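-- pv_equiv track=rewrite | github.com/hideousmaiden/youngtyp_corpora | website.py | make_right
-- ===== SOURCE A (Python) =====
-- def make_right(sents, id_sent, id_word, length=5):
--     try:
--         if id_word + 1 == len(sents[id_sent]):
--             right = sents[id_sent][id_word+1:]
--         else:
--             right = []
--     except IndexError:
--         return 'AAAA AAAA'
--     id_sent += 1
--     while len(right) < length and id_sent < len(sents):
--         n_needed = length - len(right)
--         if len(sents[id_sent]) < n_needed:
--             n_needed = len(sents[id_sent])
--         fetch = sents[id_sent][:n_needed]
--         right += fetch
--         id_sent += 1
--     return ' '.join(right)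
-- ===== SOURCE B (Python) =====
-- def make_right(sents, id_sent, id_word, length=5):
--     n = len(sents)
--     if not -n <= id_sent < n:
--         return 'AAAA AAAA'
--     id_sent %= n
--     words = [w for sent in sents[id_sent + 1:] for w in sent]
--     return ' '.join(words[:max(length, 0)])
-- ===== Notes on version B (the rewrite author's own statement) =====
-- stated objective: simpler
-- what changed: Replaces the running-remainder while-loop that fetches per-sentence prefixes with an explicit bounds check, index normalization, a single flatten of the tail sentences and one truncation to `length` words.
-- intended difference: On in-range negative id_sent where length exceeds the number of words after the (wrapped) sentence and the corpus has any word, A's fetch loop restarts from the first sentence (its guard wraps the negative index but the loop counts from id_sent+1 upward) and returns words from the start of the corpus; B normalizes the index and returns only the words that actually follow that sentence, the intended right context. — e.g. on make_right([["a"], ["b"]], -1, 0, 5): A returns "a b", B returns ""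
import Mathlib
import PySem

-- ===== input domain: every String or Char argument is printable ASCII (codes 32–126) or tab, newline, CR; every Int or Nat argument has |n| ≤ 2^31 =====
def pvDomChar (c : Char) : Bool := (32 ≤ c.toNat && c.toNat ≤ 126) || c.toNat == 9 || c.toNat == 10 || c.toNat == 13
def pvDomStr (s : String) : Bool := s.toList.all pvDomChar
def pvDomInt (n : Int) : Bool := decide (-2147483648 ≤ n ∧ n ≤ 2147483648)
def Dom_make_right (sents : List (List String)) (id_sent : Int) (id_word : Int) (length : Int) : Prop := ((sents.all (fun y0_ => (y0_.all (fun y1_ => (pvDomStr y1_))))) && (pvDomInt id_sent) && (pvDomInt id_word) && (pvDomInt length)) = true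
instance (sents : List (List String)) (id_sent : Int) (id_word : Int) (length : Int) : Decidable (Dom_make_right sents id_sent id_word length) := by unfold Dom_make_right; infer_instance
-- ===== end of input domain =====

-- B replaces A's running-remainder fetch loop with bounds check + index normalization + flatten-the-tail + one truncation ('simpler'); on in-range negative id_sent, where A's loop wraps back to the corpus start, B returns the intended right context (see D_).

-- ===== PORT A =====
-- the while loop of A: fuel = number of remaining sentence indices below len(sents)
def make_right_loop (sents : List (List String)) (length : Int) : Nat → Int → List String → List String
  | 0, _, right => right
  | fuel + 1, id_sent, right =>
    if (right.length : Int) < length ∧ id_sent < (sents.length : Int) then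
      -- sents[id_sent]: always in range here (id_sent ≥ -len+1 on every call chain), so pyGetD is exact
      let s := PySem.List.pyGetD sents id_sent []
      let n_needed := length - (right.length : Int)
      let n_needed := if (s.length : Int) < n_needed then (s.length : Int) else n_needed
      let fetch := PySem.List.slice s none (some n_needed)
      make_right_loop sents length fuel (id_sent + 1) (right ++ fetch)
    else right

def make_right (sents : List (List String)) (id_sent : Int) (id_word : Int) (length : Int) : String :=
  match PySem.List.pyGet? sents id_sent with
  | none => "AAAA AAAA"   -- except IndexError
  | some s =>
    let right : List String :=
      if id_word + 1 = (s.length : Int) then PySem.List.slice s (some (id_word + 1)) none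
      else []
    PySem.Str.join " " (make_right_loop sents length ((sents.length : Int) - (id_sent + 1)).toNat (id_sent + 1) right)

-- ===== PORT B =====
def make_right_alt (sents : List (List String)) (id_sent : Int) (id_word : Int) (length : Int) : String :=
  let n : Int := sents.length
  if ¬ (-n ≤ id_sent ∧ id_sent < n) then "AAAA AAAA"
  else
    let i := PySem.Int.mod id_sent n
    let words := (PySem.List.slice sents (some (i + 1)) none).flatMap (fun sent => sent)
    PySem.Str.join " " (PySem.List.slice words none (some (max length 0)))

-- ===== PRECONDITION & SPEC =====
-- On in-range negative id_sent where length exceeds the word count after the (wrapped) sentence and the corpus has words, A's fetch loop restarts from the first sentence and returns words from the corpus start; B returns only the words following that sentence, the intended right context (the degenerate corner where both joins collapse to "" is outside D_).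
def D_make_right (sents : List (List String)) (id_sent : Int) (id_word : Int) (length : Int) : Prop :=
  let t := (sents.drop (id_sent + (sents.length : Int) + 1).toNat).flatten;
  -(sents.length : Int) ≤ id_sent ∧ id_sent < 0 ∧ (t.length : Int) < max length 0 ∧
  sents.flatten ≠ [] ∧ (t ≠ [] ∨ sents.flatten.take (max length 0).toNat ≠ [""])

instance (sents : List (List String)) (id_sent : Int) (id_word : Int) (length : Int) : Decidable (D_make_right sents id_sent id_word length) := by unfold D_make_right; infer_instance

def Spec_make_right (sents : List (List String)) (id_sent : Int) (id_word : Int) (length : Int) (out : String) : Prop := ¬ D_make_right sents id_sent id_word length → out = make_right_alt sents id_sent id_word length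

instance (sents : List (List String)) (id_sent : Int) (id_word : Int) (length : Int) (out : String) : Decidable (Spec_make_right sents id_sent id_word length out) := by unfold Spec_make_right; infer_instance

def pvDiffWitness_make_right : List (List String) × Int × Int × Int := ([["a"], ["b"]], -1, 0, 5)
def pvDiffWitnessOut_make_right : String × String := ("a b", "")

-- ===== CLAIM =====
def Claim_unchanged_make_right : Prop := ∀ (sents : List (List String)) (id_sent : Int) (id_word : Int) (length : Int), Dom_make_right sents id_sent id_word length → Spec_make_right sents id_sent id_word length (make_right sents id_sent id_word length)

def Claim_changed_make_right : Prop := Dom_make_right (pvDiffWitness_make_right.1) (pvDiffWitness_make_right.2.1) (pvDiffWitness_make_right.2.2.1) (pvDiffWitness_make_right.2.2.2) ∧ D_make_right (pvDiffWitness_make_right.1) (pvDiffWitness_make_right.2.1) (pvDiffWitness_make_right.2.2.1) (pvDiffWitness_make_right.2.2.2) ∧ make_right (pvDiffWitness_make_right.1) (pvDiffWitness_make_right.2.1) (pvDiffWitness_make_right.2.2.1) (pvDiffWitness_make_right.2.2.2) = pvDiffWitnessOut_make_right.1 ∧ make_right_alt (pvDiffWitness_make_right.1) (pvDiffWitness_make_right.2.1)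 (pvDiffWitness_make_right.2.2.1) (pvDiffWitness_make_right.2.2.2) = pvDiffWitnessOut_make_right.2 ∧ pvDiffWitnessOut_make_right.1 ≠ pvDiffWitnessOut_make_right.2

def Claim_exact_make_right : Prop := ∀ (sents : List (List String)) (id_sent : Int) (id_word : Int) (length : Int), Dom_make_right sents id_sent id_word length → D_make_right sents id_sent id_word length → make_right sents id_sent id_word length ≠ make_right_alt sents id_sent id_word length

-- ===== LEMMAS AND PROOFS =====

-- the word sequence A's loop walks from index i (for i < 0 it wraps once, then rescans the whole corpus)
def wordsFrom (sents : List (List String)) (i : Int) : List String :=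
  if i < 0 then (sents.drop (sents.length + i).toNat).flatten ++ sents.flatten
  else (sents.drop i.toNat).flatten

theorem wordsFrom_ge (sents : List (List String)) (i : Int) (h : (sents.length : Int) ≤ i) :
    wordsFrom sents i = [] := by
  unfold wordsFrom
  rw [if_neg (by omega)]
  have : sents.drop i.toNat = [] := List.drop_eq_nil_of_le (by omega)
  simp [this]

theorem pyGetD_inrange (sents : List (List String)) (i : Int)
    (h1 : -(sents.length : Int) ≤ i) (h2 : i < (sents.length : Int)) :
    PySem.List.pyGetD sents i [] =
      sents.getD (if i < 0 then ((sents.length : Int) + i).toNat else i.toNat) [] := by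
  by_cases hi : i < 0
  · have hk : 0 < (-i).toNat := by omega
    have hk2 : (-i).toNat ≤ sents.length := by omega
    have hi' : i = -((-i).toNat : Int) := by omega
    rw [hi', PySem.List.pyGetD_neg_natCast _ _ _ hk hk2]
    rw [if_pos (by omega)]
    have hlt : sents.length - (-i).toNat < sents.length := by omega
    have heq : ((sents.length : Int) + -((-i).toNat : Int)).toNat = sents.length - (-i).toNat := by omega
    rw [heq, List.getD_eq_getElem _ _ hlt]
  · rw [if_neg hi, PySem.List.pyGetD_eq_getElem _ _ (by omega) h2,
      List.getD_eq_getElem _ _ (by omega)]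

theorem wordsFrom_step (sents : List (List String)) (i : Int)
    (h1 : -(sents.length : Int) ≤ i) (h2 : i < (sents.length : Int)) :
    wordsFrom sents i = PySem.List.pyGetD sents i [] ++ wordsFrom sents (i + 1) := by
  rw [pyGetD_inrange sents i h1 h2]
  unfold wordsFrom
  by_cases hi : i < 0
  · simp only [if_pos hi]
    have hlt : ((sents.length : Int) + i).toNat < sents.length := by omega
    rw [List.getD_eq_getElem _ _ hlt]
    rw [List.drop_eq_getElem_cons hlt, List.flatten_cons]
    by_cases hi1 : i + 1 < 0
    · simp only [if_pos hi1]
      have he : ((sents.length : Int) + (i + 1)).toNat = ((sents.length : Int) + i).toNat + 1 := by omega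
      rw [he, List.append_assoc]
    · simp only [if_neg hi1]
      have h0 : i + 1 = 0 := by omega
      have he : ((sents.length : Int) + i).toNat + 1 = sents.length := by omega
      rw [he, h0]
      simp
  · simp only [if_neg hi, if_neg (show ¬ i + 1 < 0 by omega)]
    have hlt : i.toNat < sents.length := by omega
    rw [List.getD_eq_getElem _ _ hlt]
    rw [List.drop_eq_getElem_cons hlt, List.flatten_cons]
    have he : (i + 1).toNat = i.toNat + 1 := by omega
    rw [he]

theorem loop_spec (sents : List (List String)) (length : Int) :
    ∀ (fuel : Nat) (i : Int) (right : List String),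
      i + fuel = (sents.length : Int) → -(sents.length : Int) ≤ i →
      make_right_loop sents length fuel i right =
        right ++ (wordsFrom sents i).take (length - right.length).toNat := by
  intro fuel
  induction fuel with
  | zero =>
    intro i right hfi hlo
    rw [make_right_loop, wordsFrom_ge sents i (by omega)]
    simp
  | succ f ih =>
    intro i right hfi hlo
    rw [make_right_loop]
    by_cases hc : (right.length : Int) < length ∧ i < (sents.length : Int)
    · rw [if_pos hc]
      rw [ih (i + 1) _ (by omega) (by omega)]
      rw [wordsFrom_step sents i hlo hc.2]
      set s := PySem.List.pyGetD sents i [] with hs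
      have hfetch : PySem.List.slice s none
          (some (if (s.length : Int) < length - (right.length : Int) then (s.length : Int)
                 else length - (right.length : Int))) =
          s.take (min s.length (length - (right.length : Int)).toNat) := by
        by_cases hss : (s.length : Int) < length - (right.length : Int)
        · rw [if_pos hss, PySem.List.slice_to _ (by omega)]
          congr 1; omega
        · rw [if_neg hss, PySem.List.slice_to _ (by omega)]
          congr 1; omega
      rw [hfetch]
      rw [List.take_append, List.append_assoc]
      congr 1
      have htk : s.take (length - (right.length : Int)).toNat =
          s.take (min s.length (length - (right.length : Int)).toNat) := by
        by_cases hss : s.length ≤ (length - (right.length : Int)).toNat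
        · rw [min_eq_left hss, List.take_of_length_le hss, List.take_length]
        · rw [min_eq_right (by omega)]
      rw [← htk]
      congr 1
      congr 1
      simp only [List.length_append, List.length_take]
      omega
    · rw [if_neg hc]
      rcases not_and_or.mp hc with h | h
      · have : (length - (right.length : Int)).toNat = 0 := by omega
        rw [this]
        simp
      · rw [wordsFrom_ge sents i (by omega)]
        simp

theorem flatten_drop_nil (sents : List (List String)) (k : Nat)
    (h : sents.flatten = []) :
    (sents.drop k).flatten = [] := by
  rw [List.flatten_eq_nil_iff] at h ⊢
  intro x hx
  exact h x (List.mem_of_mem_drop hx)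

-- A's value for any in-range id_sent
theorem A_val (sents : List (List String)) (id_sent id_word length : Int)
    (h1 : -(sents.length : Int) ≤ id_sent) (h2 : id_sent < (sents.length : Int)) :
    make_right sents id_sent id_word length =
      PySem.Str.join " " ((wordsFrom sents (id_sent + 1)).take length.toNat) := by
  unfold make_right
  cases hget : PySem.List.pyGet? sents id_sent with
  | none =>
    have hni : ¬ PySem.Raise.InRange sents.length id_sent :=
      (PySem.List.pyGet?_eq_none_iff _ _).mp hget
    exact absurd (show PySem.Raise.InRange sents.length id_sent by
      unfold PySem.Raise.InRange; omega) hni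
  | some s =>
    dsimp only
    have hright : (if id_word + 1 = (s.length : Int)
        then PySem.List.slice s (some (id_word + 1)) none else []) = ([] : List String) := by
      by_cases hw : id_word + 1 = (s.length : Int)
      · rw [if_pos hw, PySem.List.slice_from _ (by omega)]
        apply List.drop_eq_nil_of_le
        omega
      · rw [if_neg hw]
    rw [hright]
    have hfuel : id_sent + 1 + (((sents.length : Int) - (id_sent + 1)).toNat : Int)
        = (sents.length : Int) := by omega
    rw [loop_spec sents length _ (id_sent + 1) [] hfuel (by omega)]
    simp only [List.nil_append, List.length_nil, Nat.cast_zero, sub_zero]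

-- B's value for any in-range id_sent
theorem B_val (sents : List (List String)) (id_sent id_word length : Int)
    (h1 : -(sents.length : Int) ≤ id_sent) (h2 : id_sent < (sents.length : Int)) :
    make_right_alt sents id_sent id_word length =
      PySem.Str.join " "
        ((sents.drop ((if id_sent < 0 then id_sent + (sents.length : Int) else id_sent) + 1).toNat).flatten.take
          (max length 0).toNat) := by
  unfold make_right_alt
  dsimp only
  rw [if_neg (not_not_intro ⟨h1, h2⟩)]
  have hmod : PySem.Int.mod id_sent (sents.length : Int) =
      (if id_sent < 0 then id_sent + (sents.length : Int) else id_sent) := by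
    simp only [PySem.Int.mod]
    rw [Int.fmod_eq_emod, if_pos (Or.inl (show (0:Int) ≤ (sents.length : Int) by omega))]
    split_ifs with h
    · rw [← Int.add_emod_right, Int.emod_eq_of_lt (by omega) (by omega)]
      omega
    · rw [Int.emod_eq_of_lt (by omega) h2]
      omega
  rw [hmod]
  simp only [List.flatMap_id']
  rw [PySem.List.slice_from _ (by split_ifs <;> omega)]
  rw [PySem.List.slice_to _ (by omega)]

theorem wordsFrom_neg (sents : List (List String)) (id_sent : Int)
    (h1 : -(sents.length : Int) ≤ id_sent) (hneg : id_sent < 0) :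
    wordsFrom sents (id_sent + 1) =
      (sents.drop (id_sent + (sents.length : Int) + 1).toNat).flatten ++ sents.flatten := by
  unfold wordsFrom
  by_cases hlt : id_sent + 1 < 0
  · rw [if_pos hlt]
    congr 3
    omega
  · rw [if_neg hlt]
    have h0 : id_sent = -1 := by omega
    have hdropall : (id_sent + (sents.length : Int) + 1).toNat = sents.length := by omega
    rw [hdropall, h0]
    simp

-- ' '.join over chars: splitting an append of two nonempty part-lists
theorem chars_join_append (sep : List Char) (b : List (List Char)) (hb : b ≠ []) :
    ∀ a : List (List Char), a ≠ [] →
      PySem.Chars.join sep (a ++ b) = PySem.Chars.join sep a ++ sep ++ PySem.Chars.join sep b := by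
  intro a
  induction a with
  | nil => intro h; exact absurd rfl h
  | cons x xs ih =>
    intro _
    cases xs with
    | nil =>
      obtain ⟨y, ys, rfl⟩ := List.exists_cons_of_ne_nil hb
      rw [List.singleton_append, PySem.Chars.join_cons_cons, PySem.Chars.join_singleton]
    | cons z zs =>
      rw [List.cons_append, List.cons_append, PySem.Chars.join_cons_cons]
      rw [show z :: (zs ++ b) = (z :: zs) ++ b from rfl]
      rw [ih (by simp), PySem.Chars.join_cons_cons]
      simp [List.append_assoc]

-- appending a nonempty tail of words changes the joined string (unless everything collapses to "")
theorem str_join_words_ne (t extra : List String) (hextra : extra ≠ [])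
    (h : t ≠ [] ∨ extra ≠ [""]) :
    PySem.Str.join " " (t ++ extra) ≠ PySem.Str.join " " t := by
  intro heq
  have h2 := congrArg String.toList heq
  simp only [PySem.Str.join, String.toList_ofList, List.map_append] at h2
  cases t with
  | nil =>
    have hex : extra ≠ [""] := h.resolve_left (by simp)
    simp only [List.map_nil, List.nil_append, PySem.Chars.join_nil] at h2
    cases extra with
    | nil => exact hextra rfl
    | cons w ws =>
      cases ws with
      | nil =>
        rw [List.map_cons, List.map_nil, PySem.Chars.join_singleton] at h2
        apply hex
        have hw : w = "" := by
          have h3 := congrArg String.ofList h2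
          rwa [String.ofList_toList] at h3
        rw [hw]
      | cons v vs =>
        rw [List.map_cons, List.map_cons, PySem.Chars.join_cons_cons] at h2
        have hlen := congrArg List.length h2
        simp only [List.length_append, List.length_nil] at hlen
        have hsl : (" ".toList).length = 1 := by decide
        omega
  | cons x xs =>
    have hme : extra.map String.toList ≠ [] := by simp [hextra]
    rw [chars_join_append _ _ hme _ (by simp)] at h2
    have hlen := congrArg List.length h2
    rw [List.length_append, List.length_append] at hlen
    have hsl : (" ".toList).length = 1 := by decide
    omega

-- ===== VERDICT =====
theorem make_right_spec : Claim_unchanged_make_right := by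
  unfold Claim_unchanged_make_right
  intro sents id_sent id_word length _hdom hnd
  by_cases hr : -(sents.length : Int) ≤ id_sent ∧ id_sent < (sents.length : Int)
  · rw [A_val sents id_sent id_word length hr.1 hr.2, B_val sents id_sent id_word length hr.1 hr.2]
    by_cases hneg : id_sent < 0
    · rw [if_pos hneg, wordsFrom_neg sents id_sent hr.1 hneg]
      rw [show length.toNat = (max length 0).toNat from by omega]
      have hcase : (max length 0).toNat ≤
            (sents.drop (id_sent + (sents.length : Int) + 1).toNat).flatten.length ∨
          sents.flatten = [] ∨
          ((sents.drop (id_sent + (sents.length : Int) + 1).toNat).flatten = [] ∧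
            sents.flatten.take (max length 0).toNat = [""]) := by
        by_cases c1 : (max length 0).toNat ≤
            (sents.drop (id_sent + (sents.length : Int) + 1).toNat).flatten.length
        · exact Or.inl c1
        by_cases c2 : sents.flatten = []
        · exact Or.inr (Or.inl c2)
        by_cases c3 : (sents.drop (id_sent + (sents.length : Int) + 1).toNat).flatten = [] ∧
            sents.flatten.take (max length 0).toNat = [""]
        · exact Or.inr (Or.inr c3)
        exact absurd ⟨hr.1, hneg, by omega, c2, by tauto⟩ hnd
      rcases hcase with hle | hall | ⟨ht0, hcol⟩
      · congr 1
        exact List.take_append_of_le_length hle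
      · have htl := flatten_drop_nil sents (id_sent + (sents.length : Int) + 1).toNat hall
        rw [hall, htl]
        simp
      · rw [ht0, List.nil_append, hcol, List.take_nil]
        decide
    · rw [if_neg hneg]
      unfold wordsFrom
      rw [if_neg (by omega)]
      rw [show length.toNat = (max length 0).toNat from by omega]
  · unfold make_right make_right_alt
    have hnone : PySem.List.pyGet? sents id_sent = none :=
      (PySem.List.pyGet?_eq_none_iff _ _).mpr (by unfold PySem.Raise.InRange; omega)
    rw [hnone]
    dsimp only
    rw [if_pos hr]

theorem make_right_changed : Claim_changed_make_right := by
  unfold Claim_changed_make_right; decide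

theorem make_right_tight : Claim_exact_make_right := by
  unfold Claim_exact_make_right
  intro sents id_sent id_word length _hdom hd
  simp only [D_make_right] at hd
  obtain ⟨h1, hneg, hlt, hall, hc⟩ := hd
  have h2 : id_sent < (sents.length : Int) := by omega
  rw [A_val sents id_sent id_word length h1 h2, B_val sents id_sent id_word length h1 h2]
  rw [if_pos hneg, wordsFrom_neg sents id_sent h1 hneg]
  rw [show length.toNat = (max length 0).toNat from by omega]
  set T := (max length 0).toNat with hT
  set t := (sents.drop (id_sent + (sents.length : Int) + 1).toNat).flatten with ht
  have htle : t.length ≤ T := by omega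
  have htake_t : t.take T = t := List.take_of_length_le htle
  have hsplit : (t ++ sents.flatten).take T = t ++ sents.flatten.take (T - t.length) := by
    rw [List.take_append, htake_t]
  rw [hsplit, htake_t]
  apply str_join_words_ne
  · intro hnil
    rcases List.take_eq_nil_iff.mp hnil with h | h
    · omega
    · exact hall h
  · rcases hc with hcl | hcr
    · exact Or.inl hcl
    · by_cases ht0 : t = []
      · right
        rw [ht0]
        simpa using hcr
      · exact Or.inl ht0
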